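-- pv_equiv track=rewrite | github.com/joyful-young/OnlineJudge | 프로그래머스/4/64063. 호텔 방 배정/호텔 방 배정.py | solution
-- ===== SOURCE A (Python) =====
-- def solution(k, room_number):
--     N = len(room_number)
--     answer = [0] * N
--
--     assigned = dict()
--     for guest in range(N):
--         room = room_number[guest]
--         temp = [room]
--         while room in assigned:
--             room = assigned[room]
--             temp.append(room)
--
--         answer[guest] = room
--         for r in temp:
--             assigned[r] = room + 1
--
--     return answer
-- ===== SOURCE B (Python) =====
-- def solution(k, room_number):
--     occupied = set()
--     answer = []
--     for room in room_number:
--         while room in occupied: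
--             room += 1
--         answer.append(room)
--         occupied.add(room)
--     return answer
-- ===== Notes on version B (the rewrite author's own statement) =====
-- stated objective: simpler
-- what changed: Replaces the union-find-style pointer-chasing dict (with path-compression reinsertion of the whole chain) by a plain occupied set scanned upward one room at a time; same smallest-free-room-at-least-request assignment.
import Mathlib
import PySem

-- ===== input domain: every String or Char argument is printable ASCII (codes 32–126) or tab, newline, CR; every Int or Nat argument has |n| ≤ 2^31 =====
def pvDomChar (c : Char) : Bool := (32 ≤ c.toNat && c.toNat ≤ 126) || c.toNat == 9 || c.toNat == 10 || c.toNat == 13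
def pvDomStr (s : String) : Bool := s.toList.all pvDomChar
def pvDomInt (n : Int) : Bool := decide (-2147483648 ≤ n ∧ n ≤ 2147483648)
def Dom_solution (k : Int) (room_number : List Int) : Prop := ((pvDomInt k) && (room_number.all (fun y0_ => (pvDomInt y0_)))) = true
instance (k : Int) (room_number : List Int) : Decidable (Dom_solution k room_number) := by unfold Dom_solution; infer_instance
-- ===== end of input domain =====

-- B replaces A's union-find-style pointer-chasing dict by a plain occupied set scanned
-- upward one room at a time: simpler, same assignment (smallest free room ≥ request).

-- ===== PORT A =====
-- 'while room in assigned: room = assigned[room]; temp.append(room)'.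
-- Fuel (dict size + 1) only makes the loop structurally total: in every state A's
-- dict reaches, each in-dict step moves to a strictly larger key, so the loop ends
-- within d.size steps (proved below); the fallback branch is never taken.
def pvChaseA (d : PySem.Dict Int Int) : Nat → Int → List Int → Int × List Int
  | 0, room, temp => (room, temp)
  | fuel + 1, room, temp =>
    match d.get? room with
    | some v => pvChaseA d fuel v (temp ++ [v])
    | none => (room, temp)

-- the 'for guest in range(N)' loop; Python fills answer[guest] in index order,
-- which is the same as appending each guest's room in order.
def pvLoopA (d : PySem.Dict Int Int) (rooms : List Int) (answer : List Int) : List Int :=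
  match rooms with
  | [] => answer
  | r :: rest =>
    let res := pvChaseA d (d.size + 1) r [r]
    pvLoopA (res.2.foldl (fun acc t => acc.insert t (res.1 + 1)) d) rest (answer ++ [res.1])

def solution (k : Int) (room_number : List Int) : List Int :=
  pvLoopA PySem.Dict.empty room_number []

-- ===== PORT B =====
-- 'while room in occupied: room += 1'.  Fuel (set size + 1) only makes the loop
-- structurally total: each in-set step hits a distinct member of occupied, so the
-- loop ends within occ.length steps (proved below); the fallback is never taken.
def pvScanB (occ : PySem.Set Int) : Nat → Int → Int
  | 0, room => room
  | fuel + 1, room =>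
    if PySem.Set.contains occ room then pvScanB occ fuel (room + 1) else room

def pvLoopB (occ : PySem.Set Int) (rooms : List Int) (answer : List Int) : List Int :=
  match rooms with
  | [] => answer
  | r :: rest =>
    let room := pvScanB occ (occ.length + 1) r
    pvLoopB (PySem.Set.add occ room) rest (answer ++ [room])

def solution_alt (k : Int) (room_number : List Int) : List Int :=
  pvLoopB PySem.Set.empty room_number []

-- ===== PRECONDITION & SPEC =====
def Spec_solution (k : Int) (room_number : List Int) (out : List Int) : Prop := out = solution_alt k room_number
instance (k : Int) (room_number : List Int) (out : List Int) : Decidable (Spec_solution k room_number out) := by unfold Spec_solution; infer_instance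

-- ===== CLAIM (what is proved, stated in full; the proofs are below) =====
def Claim_equal_solution : Prop := ∀ (k : Int) (room_number : List Int), Dom_solution k room_number → Spec_solution k room_number (solution k room_number)

-- ===== LEMMAS AND PROOFS =====

-- number of elements of s that are ≥ r : the common fuel measure
def pvGauge (s : List Int) (r : Int) : Nat := (s.filter (fun x => decide (r ≤ x))).length

lemma pvGauge_le_length (s : List Int) (r : Int) : pvGauge s r ≤ s.length :=
  List.length_filter_le _ _

lemma pvFilter_mono (s : List Int) {p q : Int → Bool} (h : ∀ x, p x = true → q x = true) :
    (s.filter p).length ≤ (s.filter q).length := by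
  rw [← List.countP_eq_length_filter, ← List.countP_eq_length_filter]
  exact List.countP_mono_left (fun a _ => h a)

-- when r ∈ s, strictly fewer elements are ≥ r+1 than are ≥ r
lemma pvGauge_succ_lt (s : List Int) (r : Int) (h : r ∈ s) :
    pvGauge s (r + 1) < pvGauge s r := by
  induction s with
  | nil => cases h
  | cons a t ih =>
    have mono : (List.filter (fun x => decide (r + 1 ≤ x)) t).length ≤
        (List.filter (fun x => decide (r ≤ x)) t).length :=
      pvFilter_mono t (by intro x hx; simp only [decide_eq_true_eq] at *; omega)
    unfold pvGauge at ih ⊢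
    rw [List.filter_cons, List.filter_cons]
    rcases List.mem_cons.mp h with rfl | hmem
    · split_ifs with h1 h2 h2 <;> simp_all
    · have ihh := ih hmem
      split_ifs with h1 h2 h2 <;> simp_all <;> omega

-- the dict invariant A maintains: every stored value exceeds its key, and the whole
-- interval [key, value) consists of keys
def pvInv (d : PySem.Dict Int Int) : Prop :=
  ∀ r v, d.get? r = some v → r < v ∧ ∀ m, r ≤ m → m < v → m ∈ d.keys

-- full characterisation of A's chase loop under the invariant, generalised over the
-- accumulator for the induction
lemma pvChaseA_spec (d : PySem.Dict Int Int) (hinv : pvInv d) :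
    ∀ (fuel : Nat) (r0 r : Int) (temp : List Int),
      pvGauge d.keys r < fuel →
      r0 ≤ r →
      r ∈ temp →
      (∀ t ∈ temp, r0 ≤ t ∧ t ≤ r ∧ (t ∈ d.keys ∨ t = r)) →
      (∀ x, r0 ≤ x → x < r → x ∈ d.keys) →
      (pvChaseA d fuel r temp).1 ∉ d.keys ∧
      r0 ≤ (pvChaseA d fuel r temp).1 ∧
      (∀ x, r0 ≤ x → x < (pvChaseA d fuel r temp).1 → x ∈ d.keys) ∧
      (pvChaseA d fuel r temp).1 ∈ (pvChaseA d fuel r temp).2 ∧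
      (∀ t ∈ (pvChaseA d fuel r temp).2,
        r0 ≤ t ∧ t ≤ (pvChaseA d fuel r temp).1 ∧
        (t ∈ d.keys ∨ t = (pvChaseA d fuel r temp).1)) := by
  intro fuel
  induction fuel with
  | zero => intro r0 r temp hf; omega
  | succ fuel ih =>
    intro r0 r temp hf hr0 hrt htemp hbelow
    unfold pvChaseA
    cases hg : d.get? r with
    | none =>
      simp only
      have hnk : r ∉ d.keys := by
        intro hmem
        have := (PySem.Dict.get?_eq_none_iff_not_mem_keys d r).mp hg
        exact this hmem
      exact ⟨hnk, hr0, hbelow, hrt, fun t ht => by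
        rcases htemp t ht with ⟨h1, h2, h3⟩; exact ⟨h1, h2, h3⟩⟩
    | some v =>
      simp only
      obtain ⟨hlt, hint⟩ := hinv r v hg
      have hrk : r ∈ d.keys := by
        have : d.contains r = true := by
          rw [PySem.Dict.contains_eq_isSome_get?, hg]; rfl
        exact (PySem.Dict.contains_iff_mem_keys d r).mp this
      have hfuel' : pvGauge d.keys v < fuel := by
        have hdec := pvGauge_succ_lt d.keys r hrk
        have mono : pvGauge d.keys v ≤ pvGauge d.keys (r + 1) := by
          unfold pvGauge
          exact pvFilter_mono _ (by intro x hx; simp only [decide_eq_true_eq] at *; omega)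
        omega
      apply ih r0 v (temp ++ [v])
      · exact hfuel'
      · omega
      · exact List.mem_append.mpr (Or.inr (List.mem_singleton.mpr rfl))
      · intro t ht
        rcases List.mem_append.mp ht with h | h
        · rcases htemp t h with ⟨h1, h2, h3⟩
          refine ⟨h1, by omega, ?_⟩
          rcases h3 with h3 | rfl
          · exact Or.inl h3
          · exact Or.inl hrk
        · rw [List.mem_singleton.mp h]
          exact ⟨by omega, le_refl _, Or.inr rfl⟩
      · intro x hx1 hx2
        by_cases hc : x < r
        · exact hbelow x hx1 hc
        · exact hint x (by omega) hx2

-- full characterisation of B's scan loop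
lemma pvScanB_spec (occ : PySem.Set Int) :
    ∀ (fuel : Nat) (r : Int),
      pvGauge occ r < fuel →
      (pvScanB occ fuel r ∉ occ ∧ r ≤ pvScanB occ fuel r ∧
        ∀ x, r ≤ x → x < pvScanB occ fuel r → x ∈ occ) := by
  intro fuel
  induction fuel with
  | zero => intro r hf; omega
  | succ fuel ih =>
    intro r hf
    unfold pvScanB
    by_cases hc : r ∈ occ
    · have hcc : PySem.Set.contains occ r = true := (PySem.Set.contains_iff occ r).mpr hc
      rw [hcc]
      simp only [if_true]
      have hfuel' : pvGauge occ (r + 1) < fuel := by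
        have := pvGauge_succ_lt occ r hc
        omega
      obtain ⟨h1, h2, h3⟩ := ih (r + 1) hfuel'
      refine ⟨h1, by omega, fun x hx1 hx2 => ?_⟩
      by_cases hx : x = r
      · rw [hx]; exact hc
      · exact h3 x (by omega) hx2
    · have hcc : PySem.Set.contains occ r = false := by
        rcases Bool.eq_false_or_eq_true (PySem.Set.contains occ r) with h | h
        · exact absurd ((PySem.Set.contains_iff occ r).mp h) hc
        · exact h
      rw [hcc]
      simp only [Bool.false_eq_true, if_false]
      exact ⟨hc, le_refl _, fun x hx1 hx2 => by omega⟩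

-- "first free room ≥ r" is unique, so the two loops land on the same room
lemma pvFirst_unique {S T : List Int} (hST : ∀ x, x ∈ S ↔ x ∈ T) {r a b : Int}
    (ha1 : a ∉ S) (ha2 : r ≤ a) (ha3 : ∀ x, r ≤ x → x < a → x ∈ S)
    (hb1 : b ∉ T) (hb2 : r ≤ b) (hb3 : ∀ x, r ≤ x → x < b → x ∈ T) : a = b := by
  by_contra hne
  rcases lt_or_gt_of_ne hne with h | h
  · exact ha1 ((hST a).mpr (hb3 a ha2 h))
  · exact hb1 ((hST b).mp (ha3 b hb2 h))

-- a fold of constant-value inserts: lookup is the constant on keys of the list,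
-- unchanged elsewhere
lemma pvGet?_foldl_insert_const (temp : List Int) (c : Int) :
    ∀ (d : PySem.Dict Int Int) (x : Int),
      (temp.foldl (fun acc t => acc.insert t c) d).get? x =
        if x ∈ temp then some c else d.get? x := by
  induction temp with
  | nil => intro d x; simp
  | cons t ts ih =>
    intro d x
    simp only [List.foldl_cons]
    rw [ih]
    by_cases hx : x ∈ ts
    · simp [hx, List.mem_cons]
    · by_cases hxt : x = t
      · simp [PySem.Dict.get?_insert_self, hxt]
      · rw [if_neg hx, PySem.Dict.get?_insert_of_ne _ _ hxt]
        simp [List.mem_cons, hx, hxt]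

lemma pvKeys_foldl_insert_const (temp : List Int) (c : Int) (d : PySem.Dict Int Int) (x : Int) :
    x ∈ (temp.foldl (fun acc t => acc.insert t c) d).keys ↔ x ∈ d.keys ∨ x ∈ temp := by
  have h := PySem.Dict.keys_foldl_insert (l := temp) (f := fun _ _ => c) (d := d)
  rw [h]
  exact PySem.Set.mem_update d.keys temp x

-- the main simulation: with set-equal occupied states and the invariant, the two
-- loops produce the same answers
lemma pvLoop_eq (rooms : List Int) :
    ∀ (d : PySem.Dict Int Int) (occ : PySem.Set Int) (answer : List Int),
      pvInv d → (∀ x, x ∈ d.keys ↔ x ∈ occ) →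
      pvLoopA d rooms answer = pvLoopB occ rooms answer := by
  induction rooms with
  | nil => intro d occ answer _ _; rfl
  | cons r rest ih =>
    intro d occ answer hinv hset
    unfold pvLoopA pvLoopB
    simp only
    -- fuel bounds
    have hfA : pvGauge d.keys r < d.size + 1 := by
      have h1 := pvGauge_le_length d.keys r
      have h2 : d.keys.length = d.size := by
        simp [PySem.Dict.keys, PySem.Dict.size]
      omega
    have hfB : pvGauge occ r < occ.length + 1 := by
      have := pvGauge_le_length occ r
      omega
    -- chase characterisation (r0 := r, temp := [r])
    obtain ⟨hA1, hA2, hA3, hA4, hA5⟩ :=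
      pvChaseA_spec d hinv (d.size + 1) r r [r] hfA (le_refl r)
        (List.mem_singleton.mpr rfl)
        (fun t ht => by rw [List.mem_singleton.mp ht]; exact ⟨le_refl r, le_refl r, Or.inr rfl⟩)
        (fun x hx1 hx2 => by omega)
    obtain ⟨hB1, hB2, hB3⟩ := pvScanB_spec occ (occ.length + 1) r hfB
    set res := pvChaseA d (d.size + 1) r [r] with hres
    set roomB := pvScanB occ (occ.length + 1) r with hroomB
    -- the two rooms coincide
    have hroom : res.1 = roomB := pvFirst_unique hset hA1 hA2 hA3 hB1 hB2 hB3
    -- new dict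
    set d' := res.2.foldl (fun acc t => acc.insert t (res.1 + 1)) d with hd'
    -- new keys ↔ new occupied
    have hset' : ∀ x, x ∈ d'.keys ↔ x ∈ PySem.Set.add occ roomB := by
      intro x
      rw [hd', pvKeys_foldl_insert_const, PySem.Set.mem_add, ← hroom]
      constructor
      · rintro (h | h)
        · exact Or.inl ((hset x).mp h)
        · rcases hA5 x h with ⟨_, _, h3 | h3⟩
          · exact Or.inl ((hset x).mp h3)
          · exact Or.inr h3
      · rintro (h | h)
        · exact Or.inl ((hset x).mpr h)
        · exact Or.inr (h ▸ hA4)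
    -- new invariant
    have hinv' : pvInv d' := by
      intro a v hg
      rw [hd', pvGet?_foldl_insert_const] at hg
      by_cases ha : a ∈ res.2
      · rw [if_pos ha] at hg
        obtain ⟨ha1, ha2, _⟩ := hA5 a ha
        injection hg with hv
        constructor
        · omega
        · intro m hm1 hm2
          rw [pvKeys_foldl_insert_const]
          by_cases hmr : m < res.1
          · exact Or.inl (hA3 m (by omega) hmr)
          · have : m = res.1 := by omega
            exact Or.inr (this ▸ hA4)
      · rw [if_neg ha] at hg
        obtain ⟨h1, h2⟩ := hinv a v hg
        refine ⟨h1, fun m hm1 hm2 => ?_⟩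
        rw [pvKeys_foldl_insert_const]
        exact Or.inl (h2 m hm1 hm2)
    rw [hroom]
    exact ih d' (PySem.Set.add occ roomB) (answer ++ [roomB]) hinv' hset'

-- ===== VERDICT (by name: the statement is the Claim_ definition above) =====
theorem solution_spec : Claim_equal_solution := by
  intro k room_number _
  unfold Spec_solution solution solution_alt
  apply pvLoop_eq
  · intro r v hg
    rw [PySem.Dict.get?_empty] at hg
    cases hg
  · intro x
    simp [PySem.Dict.keys_empty, PySem.Set.empty]
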